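-- pv_equiv track=rewrite | github.com/flipsmash/vocabulary | lang_chain_hello_world.py | normalize_definition_text
-- ===== SOURCE A (Python) =====
-- def normalize_definition_text(definition: str | None) -> str:
--     text = (definition or "").strip()
--     while text.startswith("("):
--         close_idx = text.find(")")
--         if close_idx == -1:
--             break
--         text = text[close_idx + 1 :].lstrip()
--     return text.lower()
-- ===== SOURCE B (Python) =====
-- def normalize_definition_text(definition):
--     text = (definition or "").strip()
--     n = len(text)
--     i = 0
--     while i < n and text[i] == "(":
--         j = i + 1
--         while j < n and text[j] != ")":
--             j += 1
--         if j == n:  # no closing paren anywhere after this point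
--             break
--         i = j + 1
--         while i < n and text[i].isspace():
--             i += 1
--     return text[i:].lower()
-- ===== Notes on version B (the rewrite author's own statement) =====
-- stated objective: alternative
-- what changed: Replaces A's while-loop of find/slice-copy/lstrip on a shrinking string by a single left-to-right index scan over the original string (inner scans for the first closing parenthesis and for whitespace), taking one final slice at the end.
import Mathlib
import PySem

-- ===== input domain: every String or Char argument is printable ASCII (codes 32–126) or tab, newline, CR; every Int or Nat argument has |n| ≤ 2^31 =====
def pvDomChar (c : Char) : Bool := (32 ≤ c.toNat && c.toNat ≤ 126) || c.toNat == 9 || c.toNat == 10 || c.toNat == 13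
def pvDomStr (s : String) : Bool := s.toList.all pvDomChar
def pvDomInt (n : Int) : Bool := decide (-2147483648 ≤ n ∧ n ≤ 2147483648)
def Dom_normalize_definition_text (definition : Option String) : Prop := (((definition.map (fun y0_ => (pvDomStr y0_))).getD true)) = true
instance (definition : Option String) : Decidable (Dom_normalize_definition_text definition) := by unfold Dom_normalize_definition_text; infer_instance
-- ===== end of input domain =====

-- B replaces A's repeated find/slice/lstrip on shrinking copies of the string by a
-- single index-free scan over the characters (alternative decomposition, no slicing).


-- ===== PORT A =====
-- A's while-loop: while text.startswith("("): find ")", slice past it, lstrip, repeat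
def pvLoopA (text : List Char) : List Char :=
  if PySem.Chars.startswith text ['('] then
    let close_idx := PySem.Chars.find text [')']
    if close_idx = -1 then text
    else pvLoopA (PySem.Chars.lstrip (PySem.List.slice text (some (close_idx + 1)) none))
  else text
termination_by text.length
decreasing_by
  rename_i h hne
  have h0 : -1 ≤ PySem.Chars.find text [')'] := PySem.Chars.neg_one_le_find text [')']
  have h1 : 0 ≤ PySem.Chars.find text [')'] := by omega
  have hnil : text ≠ [] := by
    intro hcontra; subst hcontra; simp [PySem.Chars.startswith] at h
  have hslice : PySem.List.slice text (some (PySem.Chars.find text [')'] + 1)) none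
      = text.drop (PySem.Chars.find text [')'] + 1).toNat :=
    PySem.List.slice_from _ (by omega)
  calc (PySem.Chars.lstrip (PySem.List.slice text (some (PySem.Chars.find text [')'] + 1)) none)).length
      ≤ (PySem.List.slice text (some (PySem.Chars.find text [')'] + 1)) none).length := by
        simp [PySem.Chars.lstrip]; exact List.length_dropWhile_le _ _
    _ < text.length := by
        rw [hslice]; simp [List.length_drop]
        have : 1 ≤ (PySem.Chars.find text [')'] + 1).toNat := by omega
        have : 0 < text.length := List.length_pos_iff.mpr hnil
        omega

def normalize_definition_text (definition : Option String) : String :=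
  let text := PySem.Chars.strip (definition.getD "").toList
  String.ofList (PySem.Chars.lower (pvLoopA text))

-- ===== PORT B =====
-- B's inner loop "while j < n and text[j] != ')'" plus "i = j + 1": scan to the first
-- ')' and return what follows it (none = no closing paren, the outer loop breaks)
def pvSkipClose : List Char → Option (List Char)
  | [] => none
  | c :: rest => if c = ')' then some rest else pvSkipClose rest

-- B's inner loop "while i < n and text[i].isspace(): i += 1"
def pvSkipWS : List Char → List Char
  | [] => []
  | c :: rest => if PySem.Chars.isspace c then pvSkipWS rest else c :: rest

-- termination facts for pvSkipGroups (cited by its decreasing_by)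
theorem pvSkipClose_length_lt : ∀ (xs r : List Char), pvSkipClose xs = some r → r.length < xs.length := by
  intro xs
  induction xs with
  | nil => intro r h; simp [pvSkipClose] at h
  | cons c rest ih =>
    intro r h
    by_cases hc : c = ')'
    · simp [pvSkipClose, hc] at h; subst h; simp
    · simp [pvSkipClose, hc] at h
      have := ih r h
      simp; omega

theorem pvSkipWS_length_le : ∀ (xs : List Char), (pvSkipWS xs).length ≤ xs.length := by
  intro xs
  induction xs with
  | nil => simp [pvSkipWS]
  | cons c rest ih =>
    by_cases hc : PySem.Chars.isspace c
    · simp [pvSkipWS, hc]; omega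
    · simp [pvSkipWS, hc]

-- B's outer loop "while i < n and text[i] == '('"
def pvSkipGroups : List Char → List Char
  | [] => []
  | c :: rest =>
    if c = '(' then
      match hm : pvSkipClose rest with
      | none => c :: rest
      | some r => pvSkipGroups (pvSkipWS r)
    else c :: rest
termination_by xs => xs.length
decreasing_by
  have h1 := pvSkipClose_length_lt rest r hm
  have h2 := pvSkipWS_length_le r
  simp; omega

def normalize_definition_text_alt (definition : Option String) : String :=
  let text := PySem.Chars.strip (definition.getD "").toList
  String.ofList (PySem.Chars.lower (pvSkipGroups text))

-- ===== PRECONDITION & SPEC =====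
def Spec_normalize_definition_text (definition : Option String) (out : String) : Prop := out = normalize_definition_text_alt definition
instance (definition : Option String) (out : String) : Decidable (Spec_normalize_definition_text definition out) := by unfold Spec_normalize_definition_text; infer_instance

-- ===== CLAIM (what is proved, stated in full; the proofs are below) =====
def Claim_equal_normalize_definition_text : Prop := ∀ (definition : Option String), Dom_normalize_definition_text definition → Spec_normalize_definition_text definition (normalize_definition_text definition)

-- ===== LEMMAS AND PROOFS =====

-- find.go with a one-character needle: the start offset only shifts a found index
theorem find_go_singleton_shift (c : Char) : ∀ (xs : List Char) (k : Nat),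
    PySem.Chars.find.go [c] xs k
      = if PySem.Chars.find.go [c] xs 0 = -1 then -1 else PySem.Chars.find.go [c] xs 0 + k := by
  intro xs
  induction xs with
  | nil => intro k; simp [PySem.Chars.find.go]
  | cons x xs ih =>
    intro k
    by_cases hx : x = c
    · simp [PySem.Chars.find.go, List.isPrefixOf, hx]
    · have hpre : ([c].isPrefixOf (x :: xs)) = false := by
        simp [List.isPrefixOf]; intro h; exact absurd h.symm hx
      have hge : -1 ≤ PySem.Chars.find.go [c] xs 0 := by
        have := PySem.Chars.neg_one_le_find xs [c]
        simpa [PySem.Chars.find] using this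
      rw [show PySem.Chars.find.go [c] (x::xs) k = PySem.Chars.find.go [c] xs (k+1) by
            rw [PySem.Chars.find.go]; simp [hpre],
          show PySem.Chars.find.go [c] (x::xs) 0 = PySem.Chars.find.go [c] xs 1 by
            rw [PySem.Chars.find.go]; simp [hpre]]
      rw [ih (k+1), ih 1]
      by_cases h0 : PySem.Chars.find.go [c] xs 0 = -1
      · simp [h0]
      · have : 0 ≤ PySem.Chars.find.go [c] xs 0 := by omega
        have h1 : ¬ (PySem.Chars.find.go [c] xs 0 + (1:Nat) = -1) := by push_cast; omega
        simp only [h0, if_false, h1, if_false]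
        push_cast; ring

-- one cons step of find with a one-character needle
theorem find_singleton_cons (x c : Char) (xs : List Char) :
    PySem.Chars.find (x :: xs) [c]
      = if x = c then 0
        else if PySem.Chars.find xs [c] = -1 then -1 else PySem.Chars.find xs [c] + 1 := by
  by_cases hx : x = c
  · simp [PySem.Chars.find, PySem.Chars.find.go, List.isPrefixOf, hx]
  · have hpre : ([c].isPrefixOf (x :: xs)) = false := by
      simp [List.isPrefixOf]; intro h; exact absurd h.symm hx
    simp only [PySem.Chars.find, hx, if_false]
    rw [show PySem.Chars.find.go [c] (x::xs) 0 = PySem.Chars.find.go [c] xs 1 by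
          rw [PySem.Chars.find.go]; simp [hpre]]
    rw [find_go_singleton_shift c xs 1]
    norm_num

-- pvSkipClose (B) computes drop-past-the-first-')' exactly as A's find does
theorem pvSkipClose_eq_find (xs : List Char) :
    pvSkipClose xs
      = if PySem.Chars.find xs [')'] = -1 then none
        else some (xs.drop ((PySem.Chars.find xs [')']).toNat + 1)) := by
  induction xs with
  | nil => simp [pvSkipClose, PySem.Chars.find, PySem.Chars.find.go]
  | cons c rest ih =>
    rw [find_singleton_cons]
    by_cases hc : c = ')'
    · simp [pvSkipClose, hc]
    · have hge : -1 ≤ PySem.Chars.find rest [')'] := PySem.Chars.neg_one_le_find rest [')']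
      simp only [pvSkipClose, hc, if_false, ih]
      by_cases h0 : PySem.Chars.find rest [')'] = -1
      · simp [h0]
      · have hpos : 0 ≤ PySem.Chars.find rest [')'] := by omega
        have hne : ¬ (PySem.Chars.find rest [')'] + 1 = -1) := by omega
        simp only [h0, if_false, hne]
        congr 1
        rw [show (PySem.Chars.find rest [')'] + 1).toNat + 1 = ((PySem.Chars.find rest [')']).toNat + 1) + 1 by omega]
        simp [List.drop]

-- pvSkipWS (B) is A's lstrip
theorem pvSkipWS_eq_lstrip (xs : List Char) : pvSkipWS xs = PySem.Chars.lstrip xs := by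
  induction xs with
  | nil => simp [pvSkipWS, PySem.Chars.lstrip]
  | cons c rest ih =>
    by_cases hc : PySem.Chars.isspace c
    · simp only [pvSkipWS, hc, if_true, PySem.Chars.lstrip, List.dropWhile_cons]
      simp only [PySem.Chars.lstrip] at ih
      simpa [hc] using ih
    · simp [pvSkipWS, hc, PySem.Chars.lstrip]

-- the two loops agree, by strong induction on the length
theorem pvLoopA_eq_pvSkipGroups_aux : ∀ (n : Nat) (text : List Char), text.length ≤ n → pvLoopA text = pvSkipGroups text := by
  intro n
  induction n with
  | zero =>
    intro text hlen
    have : text = [] := List.eq_nil_of_length_eq_zero (by omega)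
    subst this
    rw [pvLoopA, pvSkipGroups]
    simp [PySem.Chars.startswith]
  | succ n ih =>
    intro text hlen
    match text with
    | [] =>
      rw [pvLoopA, pvSkipGroups]; simp [PySem.Chars.startswith]
    | c :: rest =>
      by_cases hc : c = '('
      · subst hc
        have hsw : PySem.Chars.startswith ('(' :: rest) ['('] = true := by
          simp [PySem.Chars.startswith, List.isPrefixOf]
        have hcc : ¬ (('(' : Char) = ')') := by decide
        rw [pvLoopA, pvSkipGroups, find_singleton_cons]
        simp only [hsw, if_true, hcc, if_false]
        have hge : -1 ≤ PySem.Chars.find rest [')'] := PySem.Chars.neg_one_le_find rest [')']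
        by_cases h0 : PySem.Chars.find rest [')'] = -1
        · have hm : pvSkipClose rest = none := by rw [pvSkipClose_eq_find, if_pos h0]
          rw [if_pos (show (if PySem.Chars.find rest [')'] = -1 then (-1:ℤ)
                else PySem.Chars.find rest [')'] + 1) = -1 by rw [if_pos h0])]
          split
          · rfl
          · rename_i r' heq; rw [hm] at heq; cases heq
        · have hpos : 0 ≤ PySem.Chars.find rest [')'] := by omega
          have hne1 : ¬ (PySem.Chars.find rest [')'] + 1 = -1) := by omega
          have hm : pvSkipClose rest = some (rest.drop ((PySem.Chars.find rest [')']).toNat + 1)) := by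
            rw [pvSkipClose_eq_find, if_neg h0]
          rw [if_neg (show ¬ ((if PySem.Chars.find rest [')'] = -1 then (-1:ℤ)
                else PySem.Chars.find rest [')'] + 1) = -1) by rw [if_neg h0]; exact hne1)]
          rw [if_neg h0]
          split
          · rename_i heq; rw [hm] at heq; cases heq
          · rename_i r' heq; rw [hm] at heq; cases heq
            have hle : PySem.Chars.find rest [')'] ≤ rest.length := PySem.Chars.find_le_length rest [')']
            have hslice : PySem.List.slice ('(' :: rest) (some (PySem.Chars.find rest [')'] + 1 + 1)) none
                = rest.drop ((PySem.Chars.find rest [')']).toNat + 1) := by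
              rw [PySem.List.slice_from _ (by omega)]
              rw [show (PySem.Chars.find rest [')'] + 1 + 1).toNat = ((PySem.Chars.find rest [')']).toNat + 1) + 1 by omega]
              simp [List.drop]
            rw [hslice, ← pvSkipWS_eq_lstrip]
            apply ih
            have := pvSkipWS_length_le (rest.drop ((PySem.Chars.find rest [')']).toNat + 1))
            have := List.length_drop (l := rest) (i := (PySem.Chars.find rest [')']).toNat + 1)
            simp at hlen ⊢
            omega
      · have hsw : PySem.Chars.startswith (c :: rest) ['('] = false := by
          simp [PySem.Chars.startswith, List.isPrefixOf]; intro h; exact absurd h.symm hc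
        rw [pvLoopA, pvSkipGroups]
        simp [hsw, hc]

-- ===== VERDICT (by name: the statement is the Claim_ definition above) =====
theorem normalize_definition_text_spec : Claim_equal_normalize_definition_text := by
  intro d _
  unfold Spec_normalize_definition_text normalize_definition_text normalize_definition_text_alt
  exact congrArg (fun l => String.ofList (PySem.Chars.lower l))
    (pvLoopA_eq_pvSkipGroups_aux (PySem.Chars.strip (d.getD "").toList).length _ le_rfl)
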